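-- pv_equiv track=rewrite | github.com/Amb2r/Tamarin | hostogram/Func.py | his
-- ===== SOURCE A (Python) =====
-- def his (data) :
--     x1 = 0
--     x2 = 0
--     x3 = 0
--     x4 = 0
--     x5 = 0
--     x6 = 0
--     x7 = 0
--     x8 = 0
--     x9 = 0
--
--     for i in data :
--         if i < -10 :
--             x1 = x1 +1
--         if  -10 <= i < -5 :
--             x2 = x2 +1
--         if  -5 <= i < 0 :
--             x3 = x3 +1
--         if 0 <= i < 5 :
--             x4 = x4 +1
--         if 5 <= i < 10 :
--             x5 = x5 +1
--         if 10 <= i < 15 :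
--             x6 = x6 +1
--         if 15 <= i < 20 :
--             x7 = x7 +1
--         if 20 <= i < 25 :
--             x8 = x8 +1
--         if 25 <= i :
--             x9 = x9 +1
--     return ([x1, x2, x3, x4, x5, x6, x7, x8, x9])
-- ===== SOURCE B (Python) =====
-- def his(data):
--     # Arithmetic binning: bins are width 5 starting at -10, so the bin index
--     # is a clamped closed form instead of a nine-branch comparison cascade.
--     counts = [0] * 9
--     for i in data:
--         counts[min(8, max(0, (i + 10) // 5 + 1))] += 1
--     return counts
-- ===== Notes on version B (the rewrite author's own statement) =====
-- stated objective: simpler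
-- what changed: Replaces the nine-branch comparison cascade with nine separate counters by a single clamped arithmetic bin index min(8, max(0, (i+10)//5+1)) into one counts list.
import Mathlib
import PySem

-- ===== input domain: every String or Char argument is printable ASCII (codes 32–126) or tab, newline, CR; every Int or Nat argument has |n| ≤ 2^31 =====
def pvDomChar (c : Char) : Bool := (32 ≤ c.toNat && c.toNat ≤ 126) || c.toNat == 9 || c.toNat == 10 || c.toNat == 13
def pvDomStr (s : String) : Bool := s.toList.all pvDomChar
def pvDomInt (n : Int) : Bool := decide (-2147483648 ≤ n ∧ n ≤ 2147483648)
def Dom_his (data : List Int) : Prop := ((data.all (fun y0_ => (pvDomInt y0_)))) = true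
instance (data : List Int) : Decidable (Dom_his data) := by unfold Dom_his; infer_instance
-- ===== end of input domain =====

-- B replaces A's nine-branch comparison cascade by one clamped arithmetic bin index into a counts list (simpler).


-- ===== PORT A =====
def hisLoop : List Int → Int → Int → Int → Int → Int → Int → Int → Int → Int → List Int
  | [], x1, x2, x3, x4, x5, x6, x7, x8, x9 => [x1, x2, x3, x4, x5, x6, x7, x8, x9]
  | i :: rest, x1, x2, x3, x4, x5, x6, x7, x8, x9 =>
    let x1 := if i < -10 then x1 + 1 else x1
    let x2 := if -10 ≤ i ∧ i < -5 then x2 + 1 else x2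
    let x3 := if -5 ≤ i ∧ i < 0 then x3 + 1 else x3
    let x4 := if 0 ≤ i ∧ i < 5 then x4 + 1 else x4
    let x5 := if 5 ≤ i ∧ i < 10 then x5 + 1 else x5
    let x6 := if 10 ≤ i ∧ i < 15 then x6 + 1 else x6
    let x7 := if 15 ≤ i ∧ i < 20 then x7 + 1 else x7
    let x8 := if 20 ≤ i ∧ i < 25 then x8 + 1 else x8
    let x9 := if 25 ≤ i then x9 + 1 else x9
    hisLoop rest x1 x2 x3 x4 x5 x6 x7 x8 x9

def his (data : List Int) : List Int :=
  hisLoop data 0 0 0 0 0 0 0 0 0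

-- ===== PORT B =====
def hisAltStep (counts : List Int) (i : Int) : List Int :=
  let idx := (min 8 (max 0 (PySem.Int.floordiv (i + 10) 5 + 1))).toNat
  counts.set idx (counts.getD idx 0 + 1)

def his_alt (data : List Int) : List Int :=
  data.foldl hisAltStep (List.replicate 9 0)

-- ===== PRECONDITION & SPEC =====
def Spec_his (data : List Int) (out : List Int) : Prop := out = his_alt data
instance (data : List Int) (out : List Int) : Decidable (Spec_his data out) := by unfold Spec_his; infer_instance

-- ===== CLAIM (what is proved, stated in full; the proofs are below) =====
def Claim_equal_his : Prop := ∀ (data : List Int), Dom_his data → Spec_his data (his data)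

-- ===== LEMMAS AND PROOFS =====

-- One step of B on a 9-element state performs exactly A's nine conditional increments.
lemma hisAltStep_eq (i x1 x2 x3 x4 x5 x6 x7 x8 x9 : Int) :
    hisAltStep [x1, x2, x3, x4, x5, x6, x7, x8, x9] i =
      [if i < -10 then x1 + 1 else x1,
       if -10 ≤ i ∧ i < -5 then x2 + 1 else x2,
       if -5 ≤ i ∧ i < 0 then x3 + 1 else x3,
       if 0 ≤ i ∧ i < 5 then x4 + 1 else x4,
       if 5 ≤ i ∧ i < 10 then x5 + 1 else x5,
       if 10 ≤ i ∧ i < 15 then x6 + 1 else x6,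
       if 15 ≤ i ∧ i < 20 then x7 + 1 else x7,
       if 20 ≤ i ∧ i < 25 then x8 + 1 else x8,
       if 25 ≤ i then x9 + 1 else x9] := by
  unfold hisAltStep
  have hfd : PySem.Int.floordiv (i + 10) 5 = (i + 10) / 5 := by
    simp [PySem.Int.floordiv, Int.fdiv_eq_ediv]
  rcases lt_or_ge i (-10) with h | h
  · have : (min 8 (max 0 (PySem.Int.floordiv (i + 10) 5 + 1))).toNat = 0 := by rw [hfd, Int.min_def, Int.max_def]; split_ifs <;> omega
    simp only [this]
    simp [List.set, List.getD]
    omega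
  rcases lt_or_ge i (-5) with h2 | h2
  · have : (min 8 (max 0 (PySem.Int.floordiv (i + 10) 5 + 1))).toNat = 1 := by rw [hfd, Int.min_def, Int.max_def]; split_ifs <;> omega
    simp only [this]
    simp [List.set, List.getD]
    omega
  rcases lt_or_ge i 0 with h3 | h3
  · have : (min 8 (max 0 (PySem.Int.floordiv (i + 10) 5 + 1))).toNat = 2 := by rw [hfd, Int.min_def, Int.max_def]; split_ifs <;> omega
    simp only [this]
    simp [List.set, List.getD]
    omega
  rcases lt_or_ge i 5 with h4 | h4
  · have : (min 8 (max 0 (PySem.Int.floordiv (i + 10) 5 + 1))).toNat = 3 := by rw [hfd, Int.min_def, Int.max_def]; split_ifs <;> omega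
    simp only [this]
    simp [List.set, List.getD]
    omega
  rcases lt_or_ge i 10 with h5 | h5
  · have : (min 8 (max 0 (PySem.Int.floordiv (i + 10) 5 + 1))).toNat = 4 := by rw [hfd, Int.min_def, Int.max_def]; split_ifs <;> omega
    simp only [this]
    simp [List.set, List.getD]
    omega
  rcases lt_or_ge i 15 with h6 | h6
  · have : (min 8 (max 0 (PySem.Int.floordiv (i + 10) 5 + 1))).toNat = 5 := by rw [hfd, Int.min_def, Int.max_def]; split_ifs <;> omega
    simp only [this]
    simp [List.set, List.getD]
    omega
  rcases lt_or_ge i 20 with h7 | h7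
  · have : (min 8 (max 0 (PySem.Int.floordiv (i + 10) 5 + 1))).toNat = 6 := by rw [hfd, Int.min_def, Int.max_def]; split_ifs <;> omega
    simp only [this]
    simp [List.set, List.getD]
    omega
  rcases lt_or_ge i 25 with h8 | h8
  · have : (min 8 (max 0 (PySem.Int.floordiv (i + 10) 5 + 1))).toNat = 7 := by rw [hfd, Int.min_def, Int.max_def]; split_ifs <;> omega
    simp only [this]
    simp [List.set, List.getD]
    omega
  · have : (min 8 (max 0 (PySem.Int.floordiv (i + 10) 5 + 1))).toNat = 8 := by rw [hfd, Int.min_def, Int.max_def]; split_ifs <;> omega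
    simp only [this]
    simp [List.set, List.getD]
    omega

lemma hisLoop_eq_foldl (data : List Int) :
    ∀ x1 x2 x3 x4 x5 x6 x7 x8 x9 : Int,
      hisLoop data x1 x2 x3 x4 x5 x6 x7 x8 x9 =
        data.foldl hisAltStep [x1, x2, x3, x4, x5, x6, x7, x8, x9] := by
  induction data with
  | nil => intro _ _ _ _ _ _ _ _ _; rfl
  | cons i rest ih =>
    intro x1 x2 x3 x4 x5 x6 x7 x8 x9
    simp only [hisLoop, List.foldl_cons, hisAltStep_eq]
    exact ih _ _ _ _ _ _ _ _ _

-- ===== VERDICT (by name: the statement is the Claim_ definition above) =====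
theorem his_spec : Claim_equal_his := by
  intro data _
  unfold Spec_his his his_alt
  rw [hisLoop_eq_foldl]
  rfl
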